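-- pv_equiv track=rewrite | github.com/YongBhin-Kim/crypto | SEED/[06] CMAC/KISA_SEED_CMAC.py | _subkey_scheduled
-- ===== SOURCE A (Python) =====
-- def _subkey_scheduled(key):
--     """Generate subkey K1 or K2 from the given key."""
--     carry = key[0] >> 7
--     for i in range(len(key) - 1):
--         key[i] = ((key[i] << 1) & 0xFF) | (key[i + 1] >> 7)
--     key[-1] = (key[-1] << 1) & 0xFF
--     if carry:
--         key[-1] ^= 0x87  # XOR with Rb
--     return key
-- ===== SOURCE B (Python) =====
-- def _subkey_scheduled(key):
--     """Generate subkey K1 or K2 from the given key."""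
--     carry = key[0] >> 7
--     last = (key[-1] << 1) & 0xFF
--     out = [last ^ 0x87 if carry else last]
--     for a, b in reversed(list(zip(key, key[1:]))):
--         out.append(((a << 1) & 0xFF) | (b >> 7))
--     out.reverse()
--     key[:] = out
--     return key
-- ===== Notes on version B (the rewrite author's own statement) =====
-- stated objective: alternative
-- what changed: Builds the result back-to-front into a fresh accumulator - final (carry-XORed) byte decided first, then the shifted pairs walked in reverse - and reverses it once and writes it back with one slice assignment, instead of A's forward indexed loop mutating the list in place.
import Mathlib
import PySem

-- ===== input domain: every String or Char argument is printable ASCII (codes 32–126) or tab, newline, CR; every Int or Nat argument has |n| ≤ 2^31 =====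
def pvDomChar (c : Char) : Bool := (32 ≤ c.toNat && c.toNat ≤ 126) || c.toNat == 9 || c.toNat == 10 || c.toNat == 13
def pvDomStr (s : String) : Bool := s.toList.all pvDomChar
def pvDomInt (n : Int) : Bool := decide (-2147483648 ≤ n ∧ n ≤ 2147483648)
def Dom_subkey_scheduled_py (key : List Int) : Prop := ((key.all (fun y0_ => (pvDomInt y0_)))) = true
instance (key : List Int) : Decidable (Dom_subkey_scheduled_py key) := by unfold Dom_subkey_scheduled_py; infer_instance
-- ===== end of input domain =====

-- B builds the result back-to-front into a fresh accumulator (final byte first, shifted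
-- pairs walked in reverse) and reverses it once (objective: alternative).
-- Both Pythons mutate `key` in place identically (A by element assignment, B by slice
-- assignment); the theorems are about the return value.

-- ===== PORT A =====
def subkey_scheduled_py (key : List Int) : List Int :=
  let carry : Int := PySem.List.pyGetD key 0 0 >>> 7
  let k := (PySem.List.pyRange 0 (PySem.List.len key - 1) 1).foldl
    (fun ks i => PySem.List.pySetD ks i
      (PySem.Int.bor (PySem.Int.band (PySem.List.pyGetD ks i 0 <<< 1) 0xFF)
        (PySem.List.pyGetD ks (i + 1) 0 >>> 7))) key
  let k2 := PySem.List.pySetD k (-1) (PySem.Int.band (PySem.List.pyGetD k (-1) 0 <<< 1) 0xFF)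
  if carry ≠ 0 then
    PySem.List.pySetD k2 (-1) (PySem.Int.bxor (PySem.List.pyGetD k2 (-1) 0) 0x87)
  else k2

-- ===== PORT B =====
def subkey_scheduled_py_alt (key : List Int) : List Int :=
  let carry : Int := PySem.List.pyGetD key 0 0 >>> 7
  let last : Int := PySem.Int.band (PySem.List.pyGetD key (-1) 0 <<< 1) 0xFF
  let out0 : List Int := [if carry ≠ 0 then PySem.Int.bxor last 0x87 else last]
  let out := ((key.zip key.tail).reverse).foldl
    (fun (acc : List Int) (ab : Int × Int) =>
      acc ++ [PySem.Int.bor (PySem.Int.band (ab.1 <<< 1) 0xFF) (ab.2 >>> 7)]) out0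
  out.reverse

-- ===== PRECONDITION & SPEC =====
-- A raises IndexError on the empty list (key[0]), and so does B; Pre_ excludes exactly [].
def Pre_subkey_scheduled_py (key : List Int) : Prop := key ≠ []
instance (key : List Int) : Decidable (Pre_subkey_scheduled_py key) := by
  unfold Pre_subkey_scheduled_py; infer_instance
def pvWitness_subkey_scheduled_py : List Int := [128, 1]

def Spec_subkey_scheduled_py (key : List Int) (out : List Int) : Prop := out = subkey_scheduled_py_alt key
instance (key : List Int) (out : List Int) : Decidable (Spec_subkey_scheduled_py key out) := by
  unfold Spec_subkey_scheduled_py; infer_instance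

-- ===== CLAIM (what is proved, stated in full; the proofs are below) =====
def Claim_equal_subkey_scheduled_py : Prop := ∀ (key : List Int), Dom_subkey_scheduled_py key → Pre_subkey_scheduled_py key → Spec_subkey_scheduled_py key (subkey_scheduled_py key)

-- ===== LEMMAS AND PROOFS =====

-- the per-byte value A computes for all but the last byte
def pvF (a b : Int) : Int := PySem.Int.bor (PySem.Int.band (a <<< 1) 0xFF) (b >>> 7)

-- the body of A's loop, named for the proofs
def pvStep (ks : List Int) (i : Int) : List Int :=
  PySem.List.pySetD ks i
    (PySem.Int.bor (PySem.Int.band (PySem.List.pyGetD ks i 0 <<< 1) 0xFF)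
      (PySem.List.pyGetD ks (i + 1) 0 >>> 7))

-- A's intermediate shape: shifted zip pairs plus a final byte
def pvZip (key : List Int) : List Int :=
  (key.zip key.tail).map (fun ab : Int × Int => pvF ab.1 ab.2)

-- Elementwise characterisation of A's loop after the first m iterations: bytes below m are
-- updated from the ORIGINAL key (index i+1 is untouched at step i), bytes from m on are
-- still the original ones, and the length never changes.
theorem pvLoop_spec (key : List Int) (m : Nat) (hm : m + 1 ≤ key.length) :
    ((PySem.List.pyRange 0 (m : Int) 1).foldl pvStep key).length = key.length ∧
    ∀ i : Nat, i < key.length →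
      ((PySem.List.pyRange 0 (m : Int) 1).foldl pvStep key).getD i 0 =
        if i < m then pvF (key.getD i 0) (key.getD (i+1) 0) else key.getD i 0 := by
  induction m with
  | zero =>
    rw [PySem.List.pyRange_one_eq_nil (by omega)]
    simp
  | succ m ih =>
    obtain ⟨ihlen, ihget⟩ := ih (by omega)
    have hcast : ((m + 1 : Nat) : Int) = (m : Int) + 1 := by push_cast; ring
    rw [hcast, PySem.List.pyRange_one_succ_right (by positivity), List.foldl_append]
    set L := (PySem.List.pyRange 0 (m : Int) 1).foldl pvStep key with hL
    simp only [List.foldl_cons, List.foldl_nil]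
    have hgm : PySem.List.pyGetD L (m : Int) 0 = key.getD m 0 := by
      rw [PySem.List.pyGetD_natCast, ihget m (by omega)]; simp
    have hgm1 : PySem.List.pyGetD L ((m : Int) + 1) 0 = key.getD (m+1) 0 := by
      rw [show ((m : Int) + 1) = ((m + 1 : Nat) : Int) by push_cast; ring,
        PySem.List.pyGetD_natCast, ihget (m+1) (by omega)]
      simp
    unfold pvStep
    rw [hgm, hgm1, PySem.List.pySetD_natCast]
    constructor
    · simp [ihlen]
    · intro i hi
      rcases eq_or_ne i m with rfl | hne
      · rw [List.getD_eq_getElem?_getD, List.getElem?_set_self (by omega)]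
        simp [pvF, hi]
      · rw [List.getD_eq_getElem?_getD, List.getElem?_set_ne (by omega)]
        rw [← List.getD_eq_getElem?_getD, ihget i hi]
        by_cases h1 : i < m
        · rw [if_pos h1, if_pos (by omega)]
        · rw [if_neg h1, if_neg (by omega)]

-- Python's xs[-1] = v on a nonempty list is set at the last position
theorem pvSetD_neg_one {α : Type} (xs : List α) (v : α) (h : 0 < xs.length) :
    PySem.List.pySetD xs (-1) v = xs.set (xs.length - 1) v := by
  simp only [PySem.List.pySetD, PySem.List.pySet?, PySem.List.pyIdx?]
  rw [if_neg (by omega), if_pos (by omega)]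
  simp

-- A's result is the zip pairs through pvF plus the (possibly XORed) doubled last byte
theorem pvA_eq_zip (key : List Int) (hpre : key ≠ []) :
    subkey_scheduled_py key =
      pvZip key ++
        [if PySem.List.pyGetD key 0 0 >>> 7 ≠ 0 then
            PySem.Int.bxor (PySem.Int.band (key.getD (key.length - 1) 0 <<< 1) 0xFF) 0x87
          else PySem.Int.band (key.getD (key.length - 1) 0 <<< 1) 0xFF] := by
  have hn : 0 < key.length := List.length_pos_iff.mpr hpre
  obtain ⟨hlen, hget⟩ := pvLoop_spec key (key.length - 1) (by omega)
  simp only [subkey_scheduled_py, pvZip, PySem.List.len_eq]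
  have hcast : (key.length : Int) - 1 = ((key.length - 1 : Nat) : Int) := by push_cast [hn]; omega
  rw [hcast]
  set L := (PySem.List.pyRange 0 ((key.length - 1 : Nat) : Int) 1).foldl pvStep key with hL
  have hstep : (fun ks i => PySem.List.pySetD ks i
      (PySem.Int.bor (PySem.Int.band (PySem.List.pyGetD ks i 0 <<< 1) 0xFF)
        (PySem.List.pyGetD ks (i + 1) 0 >>> 7))) = pvStep := rfl
  rw [hstep]
  have hLlast : PySem.List.pyGetD L (-1) 0 = key.getD (key.length - 1) 0 := by
    rw [PySem.List.pyGetD_neg_ofNat L 1 0 (by omega) (by omega),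
      List.getElem_eq_getD (fallback := 0), hlen, hget (key.length - 1) (by omega)]
    simp
  have hklast : PySem.List.pyGetD key (-1) 0 = key.getD (key.length - 1) 0 := by
    rw [PySem.List.pyGetD_neg_ofNat key 1 0 (by omega) (by omega)]
    exact (List.getD_eq_getElem key 0 (by omega)).symm
  rw [hLlast]
  set v1 := PySem.Int.band (key.getD (key.length - 1) 0 <<< 1) 0xFF with hv1
  have hLn : 0 < L.length := by omega
  rw [pvSetD_neg_one L v1 hLn, hlen]
  have hg2 : PySem.List.pyGetD (L.set (key.length - 1) v1) (-1) 0 = v1 := by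
    rw [PySem.List.pyGetD_neg_ofNat _ 1 0 (by omega) (by simpa using hLn)]
    simp [hlen]
  rw [hg2, pvSetD_neg_one _ _ (by simpa using hLn)]
  simp only [List.length_set, hlen, List.set_set]
  have hfin : ∀ w : Int, L.set (key.length - 1) w =
      ((key.zip key.tail).map (fun ab : Int × Int => pvF ab.1 ab.2)) ++ [w] := by
    intro w
    have hzlen : (key.zip key.tail).length = key.length - 1 := by
      simp [List.length_zip]
    apply List.ext_getElem
    · simp [hlen, hzlen]; omega
    · intro i h1 h2
      rcases eq_or_ne i (key.length - 1) with rfl | hne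
      · rw [List.getElem_set_self]
        rw [List.getElem_append_right (by simp [hzlen])]
        simp [hzlen]
      · have hi : i < key.length - 1 := by simp [hlen] at h1; omega
        rw [List.getElem_set_ne (by omega)]
        rw [List.getElem_append_left (by simp [hzlen]; omega)]
        have hi1 : i < key.length := by omega
        have hi2 : i + 1 < key.length := by omega
        rw [List.getElem_eq_getD (fallback := 0), hget i (by omega), if_pos hi]
        simp [List.getElem_zip, List.getElem_tail, pvF, List.getD_eq_getElem?_getD,
          List.getElem?_eq_getElem hi1, List.getElem?_eq_getElem hi2]
  split_ifs with hc
  · exact hfin _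
  · exact hfin v1

-- B's accumulator, once reversed, is the zip pairs through pvF plus the decided final byte
theorem pvAlt_eq (key : List Int) (h : key ≠ []) :
    subkey_scheduled_py_alt key = pvZip key ++
      [if PySem.List.pyGetD key 0 0 >>> 7 ≠ 0 then
          PySem.Int.bxor (PySem.Int.band (key.getD (key.length - 1) 0 <<< 1) 0xFF) 0x87
        else PySem.Int.band (key.getD (key.length - 1) 0 <<< 1) 0xFF] := by
  have hn : 0 < key.length := List.length_pos_iff.mpr h
  have hklast : PySem.List.pyGetD key (-1) 0 = key.getD (key.length - 1) 0 := by
    rw [PySem.List.pyGetD_neg_ofNat key 1 0 (by omega) (by omega)]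
    exact (List.getD_eq_getElem key 0 (by omega)).symm
  simp only [subkey_scheduled_py_alt, hklast]
  rw [PySem.List.foldl_append_singleton_eq_map]
  rw [show (fun ab : Int × Int => PySem.Int.bor (PySem.Int.band (ab.1 <<< 1) 0xFF) (ab.2 >>> 7))
      = (fun ab : Int × Int => pvF ab.1 ab.2) from rfl]
  rw [List.map_reverse, List.reverse_append, List.reverse_reverse]
  simp [pvZip]

theorem pvMain (key : List Int) (hpre : Pre_subkey_scheduled_py key) :
    subkey_scheduled_py key = subkey_scheduled_py_alt key := by
  rw [pvA_eq_zip key hpre, pvAlt_eq key hpre]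

-- ===== VERDICT (by name: the statement is the Claim_ definition above) =====
theorem subkey_scheduled_py_spec : Claim_equal_subkey_scheduled_py := by
  intro key _ hpre
  unfold Spec_subkey_scheduled_py
  exact pvMain key hpre
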